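-- pv_equiv track=rewrite | github.com/kotaro-kadoshima/learn-atcoder-python | contest/paiza/A078.py | del_search
-- ===== SOURCE A (Python) =====
-- def match(target, answer):
--     if target == answer:
--         return True
--     return False
--
-- def del_search(s):
--     del_list = set()
--     H = len(s)
--     W = len(s[0])
--     for i in range(H):
--         for j in range(W):
--             num = s[i][j]
--             if num == ".":
--                 continue  # 空マスはスキップ
--
--             # 上下右左で判定していく
--             if i != 0:
--                 if not match(s[i - 1][j], num):
--                     continue
--
--             if i != H - 1:
--                 if not match(s[i + 1][j], num):
--                     continue
--
--             if j != W - 1: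
--                 if not match(s[i][j + 1], num):
--                     continue
--
--             if j != 0:
--                 if not match(s[i][j - 1], num):
--                     continue
--
--             # del_listに詰める
--
--             del_list.add((i, j))
--             if i != 0:
--                 del_list.add((i - 1, j))
--             if i != H - 1:
--                 del_list.add((i + 1, j))
--             if j != W - 1:
--                 del_list.add((i, j + 1))
--             if j != 0:
--                 del_list.add((i, j - 1))
--     return del_list
-- ===== SOURCE B (Python) =====
-- def del_search(s):
--     H = len(s)
--     W = len(s[0])
--
--     # Pass 1: enumerate adjacent pairs (looking only right and down); any pair
--     # with differing values puts BOTH endpoints into the conflict set.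
--     conflict = set()
--     for i in range(H):
--         for j in range(W):
--             if j + 1 < W and s[i][j] != s[i][j + 1]:
--                 conflict.add((i, j))
--                 conflict.add((i, j + 1))
--             if i + 1 < H and s[i][j] != s[i + 1][j]:
--                 conflict.add((i, j))
--                 conflict.add((i + 1, j))
--
--     # Pass 2: a cell qualifies iff it is non-'.' and conflict-free
--     # (no incident mismatching edge); mark it and its in-bounds neighbors.
--     out = set()
--     for i in range(H):
--         for j in range(W):
--             if s[i][j] != "." and (i, j) not in conflict:
--                 out.add((i, j))
--                 if i > 0:
--                     out.add((i - 1, j))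
--                 if i + 1 < H:
--                     out.add((i + 1, j))
--                 if j + 1 < W:
--                     out.add((i, j + 1))
--                 if j > 0:
--                     out.add((i, j - 1))
--     return out
-- ===== Notes on version B (the rewrite author's own statement) =====
-- stated objective: alternative
-- what changed: A probes all four neighbors of each cell inside one interleaved continue-chain loop; B instead builds a symmetric conflict set from mismatching adjacent PAIRS (scanning only right/down edges) and then qualifies a cell by a single set-membership test, so per-cell neighbor probing disappears.
import Mathlib
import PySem

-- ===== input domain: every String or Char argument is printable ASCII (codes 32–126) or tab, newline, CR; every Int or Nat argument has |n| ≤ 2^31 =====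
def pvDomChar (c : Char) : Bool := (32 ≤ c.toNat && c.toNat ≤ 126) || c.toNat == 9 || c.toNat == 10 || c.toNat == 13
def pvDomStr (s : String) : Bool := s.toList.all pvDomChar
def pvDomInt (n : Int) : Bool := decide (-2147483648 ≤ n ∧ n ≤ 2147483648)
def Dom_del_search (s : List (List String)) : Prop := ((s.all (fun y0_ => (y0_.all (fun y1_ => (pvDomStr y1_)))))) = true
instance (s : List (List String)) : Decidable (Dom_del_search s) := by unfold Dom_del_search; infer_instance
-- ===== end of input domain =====

-- B replaces A's per-cell 4-neighbor probe (one interleaved continue-chain loop) by an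
-- edge-based algorithm: pass 1 collects both endpoints of every mismatching adjacent pair
-- (scanning only right/down), pass 2 qualifies a cell by one set-membership test and marks
-- it with its in-bounds neighbors (objective: alternative; same asymptotic cost).

-- shared cell access: s[i][j] (total form; exact under Pre_)
def pvCell (s : List (List String)) (i j : Int) : String :=
  PySem.List.pyGetD (PySem.List.pyGetD s i []) j ""

-- ===== PORT A =====
-- helper 'match' from the Python module
def pvMatch (target answer : String) : Bool :=
  if target == answer then true else false

def del_search (s : List (List String)) : List (Int × Int) :=
  let H : Int := s.length
  let W : Int := (PySem.List.pyGetD s 0 []).length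
  (PySem.List.pyRange 0 H 1).foldl (fun dl i =>
    (PySem.List.pyRange 0 W 1).foldl (fun dl j =>
      let num := pvCell s i j
      if num == "." then dl
      else if i != 0 && !(pvMatch (pvCell s (i-1) j) num) then dl
      else if i != H - 1 && !(pvMatch (pvCell s (i+1) j) num) then dl
      else if j != W - 1 && !(pvMatch (pvCell s i (j+1)) num) then dl
      else if j != 0 && !(pvMatch (pvCell s i (j-1)) num) then dl
      else
        let dl := PySem.Set.add dl (i, j)
        let dl := if i != 0 then PySem.Set.add dl (i-1, j) else dl
        let dl := if i != H - 1 then PySem.Set.add dl (i+1, j) else dl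
        let dl := if j != W - 1 then PySem.Set.add dl (i, j+1) else dl
        let dl := if j != 0 then PySem.Set.add dl (i, j-1) else dl
        dl) dl) []

-- ===== PORT B =====
-- pass-1 edge tests: mismatch with the right / down neighbor
def pvHMis (s : List (List String)) (W i j : Int) : Bool :=
  decide (j + 1 < W) && (pvCell s i j != pvCell s i (j+1))

def pvVMis (s : List (List String)) (H i j : Int) : Bool :=
  decide (i + 1 < H) && (pvCell s i j != pvCell s (i+1) j)

def pvConflict (s : List (List String)) (H W : Int) : List (Int × Int) :=
  (PySem.List.pyRange 0 H 1).foldl (fun con i =>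
    (PySem.List.pyRange 0 W 1).foldl (fun con j =>
      let con := if pvHMis s W i j then
                   PySem.Set.add (PySem.Set.add con (i, j)) (i, j+1) else con
      if pvVMis s H i j then
        PySem.Set.add (PySem.Set.add con (i, j)) (i+1, j) else con) con) []

def del_search_alt (s : List (List String)) : List (Int × Int) :=
  let H : Int := s.length
  let W : Int := (PySem.List.pyGetD s 0 []).length
  let con := pvConflict s H W
  (PySem.List.pyRange 0 H 1).foldl (fun out i =>
    (PySem.List.pyRange 0 W 1).foldl (fun out j =>
      if pvCell s i j != "." && !(PySem.Set.contains con (i, j)) then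
        let out := PySem.Set.add out (i, j)
        let out := if decide (0 < i) then PySem.Set.add out (i-1, j) else out
        let out := if decide (i + 1 < H) then PySem.Set.add out (i+1, j) else out
        let out := if decide (j + 1 < W) then PySem.Set.add out (i, j+1) else out
        if decide (0 < j) then PySem.Set.add out (i, j-1) else out
      else out) out) []

-- ===== PRECONDITION & SPEC =====
-- Pre_ excludes exactly the inputs where the Python A raises IndexError: the empty grid
-- (W = len(s[0])) and grids with a row shorter than the first row.
def Pre_del_search (s : List (List String)) : Prop :=
  s ≠ [] ∧ ∀ row ∈ s, (s.headI).length ≤ row.length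
instance (s : List (List String)) : Decidable (Pre_del_search s) := by
  unfold Pre_del_search; infer_instance
def pvWitness_del_search : List (List String) := [["a", "a"], ["a", "."]]

def Spec_del_search (s : List (List String)) (out : List (Int × Int)) : Prop := out = del_search_alt s
instance (s : List (List String)) (out : List (Int × Int)) : Decidable (Spec_del_search s out) := by unfold Spec_del_search; infer_instance

-- ===== CLAIM =====
def Claim_equal_del_search : Prop := ∀ (s : List (List String)), Dom_del_search s → Pre_del_search s → Spec_del_search s (del_search s)

-- ===== LEMMAS AND PROOFS =====

-- membership in a fold whose step only ever appends elements described by Q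
lemma mem_foldl_iff {α β : Type} (p : α) (step : List α → β → List α) (Q : β → Prop)
    (h : ∀ acc x, p ∈ step acc x ↔ p ∈ acc ∨ Q x) :
    ∀ (l : List β) (init : List α), p ∈ l.foldl step init ↔ p ∈ init ∨ ∃ x ∈ l, Q x := by
  intro l
  induction l with
  | nil => intro init; simp
  | cons x xs ih =>
      intro init
      rw [List.foldl_cons, ih (step init x), h]
      constructor
      · rintro ((hp | hq) | ⟨y, hy, hQ⟩)
        · exact Or.inl hp
        · exact Or.inr ⟨x, List.mem_cons_self, hq⟩
        · exact Or.inr ⟨y, List.mem_cons_of_mem _ hy, hQ⟩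
      · rintro (hp | ⟨y, hy, hQ⟩)
        · exact Or.inl (Or.inl hp)
        · rcases List.mem_cons.mp hy with rfl | hy'
          · exact Or.inl (Or.inr hQ)
          · exact Or.inr ⟨y, hy', hQ⟩

-- what one pass-1 inner step adds
def pvQ (s : List (List String)) (H W : Int) (p : Int × Int) (i j : Int) : Prop :=
  (pvHMis s W i j = true ∧ (p = (i, j) ∨ p = (i, j+1))) ∨
  (pvVMis s H i j = true ∧ (p = (i, j) ∨ p = (i+1, j)))

lemma mem_conflict_iff_Q (s : List (List String)) (H W : Int) (p : Int × Int) :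
    p ∈ pvConflict s H W ↔
      ∃ i ∈ PySem.List.pyRange 0 H 1, ∃ j ∈ PySem.List.pyRange 0 W 1, pvQ s H W p i j := by
  unfold pvConflict
  rw [mem_foldl_iff p _ (fun i => ∃ j ∈ PySem.List.pyRange 0 W 1, pvQ s H W p i j)]
  · simp
  · intro acc i
    rw [mem_foldl_iff p _ (fun j => pvQ s H W p i j)]
    intro acc' j
    unfold pvQ
    split_ifs with h1 h2 h2 <;> simp [PySem.Set.mem_add, h1, h2] <;> tauto

-- characterization of conflict membership for an in-grid cell
lemma mem_conflict (s : List (List String)) (H W i j : Int)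
    (hi0 : 0 ≤ i) (hiH : i < H) (hj0 : 0 ≤ j) (hjW : j < W) :
    (i, j) ∈ pvConflict s H W ↔
      (pvHMis s W i j = true) ∨ (0 < j ∧ pvHMis s W i (j-1) = true) ∨
      (pvVMis s H i j = true) ∨ (0 < i ∧ pvVMis s H (i-1) j = true) := by
  rw [mem_conflict_iff_Q]
  constructor
  · rintro ⟨i', hi', j', hj', hQ⟩
    rw [PySem.List.mem_pyRange_one] at hi' hj'
    unfold pvQ at hQ
    rcases hQ with ⟨hm, hp | hp⟩ | ⟨hm, hp | hp⟩ <;>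
      injection hp with h1 h2 <;> subst h1 <;> subst h2
    · exact Or.inl hm
    · refine Or.inr (Or.inl ⟨by omega, ?_⟩)
      simpa using hm
    · exact Or.inr (Or.inr (Or.inl hm))
    · refine Or.inr (Or.inr (Or.inr ⟨by omega, ?_⟩))
      simpa using hm
  · rintro (hm | ⟨hj, hm⟩ | hm | ⟨hi, hm⟩)
    · exact ⟨i, by rw [PySem.List.mem_pyRange_one]; omega,
             j, by rw [PySem.List.mem_pyRange_one]; omega, Or.inl ⟨hm, Or.inl rfl⟩⟩
    · exact ⟨i, by rw [PySem.List.mem_pyRange_one]; omega,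
             j-1, by rw [PySem.List.mem_pyRange_one]; omega,
             Or.inl ⟨hm, Or.inr (by simp)⟩⟩
    · exact ⟨i, by rw [PySem.List.mem_pyRange_one]; omega,
             j, by rw [PySem.List.mem_pyRange_one]; omega, Or.inr ⟨hm, Or.inl rfl⟩⟩
    · exact ⟨i-1, by rw [PySem.List.mem_pyRange_one]; omega,
             j, by rw [PySem.List.mem_pyRange_one]; omega,
             Or.inr ⟨hm, Or.inr (by simp)⟩⟩

lemma pvMatch_eq (t a : String) : pvMatch t a = (t == a) := by
  unfold pvMatch
  simp
  exact (Bool.beq_eq_decide_eq t a).symm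

-- pure boolean shape of A's continue-chain
lemma pv_chain {a : Type} (acc exp : a) (c0 b1 b2 b3 b4 m1 m2 m3 m4 : Bool) :
    (if c0 = true then acc
     else if (b1 && !m1) = true then acc
     else if (b2 && !m2) = true then acc
     else if (b3 && !m3) = true then acc
     else if (b4 && !m4) = true then acc
     else exp) =
    (if (!c0 && ((!b1 || m1) && ((!b2 || m2) && ((!b3 || m3) && (!b4 || m4))))) = true
     then exp else acc) := by
  cases c0 <;> cases b1 <;> cases m1 <;> cases b2 <;> cases m2 <;>
    cases b3 <;> cases m3 <;> cases b4 <;> cases m4 <;> simp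

-- A's chain guard equals B's "non-dot and conflict-free" guard, for an in-grid cell
lemma guard_eq (s : List (List String)) (H W i j : Int)
    (hi0 : 0 ≤ i) (hiH : i < H) (hj0 : 0 ≤ j) (hjW : j < W) :
    (!(pvCell s i j == ".") &&
      ((!(i != 0) || (pvCell s (i-1) j == pvCell s i j)) &&
       ((!(i != H - 1) || (pvCell s (i+1) j == pvCell s i j)) &&
        ((!(j != W - 1) || (pvCell s i (j+1) == pvCell s i j)) &&
         (!(j != 0) || (pvCell s i (j-1) == pvCell s i j)))))) =
    (pvCell s i j != "." && !(PySem.Set.contains (pvConflict s H W) (i, j))) := by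
  have hconf := mem_conflict s H W i j hi0 hiH hj0 hjW
  have hi1 : i - 1 + 1 = i := by omega
  have hj1 : j - 1 + 1 = j := by omega
  rw [Bool.eq_iff_iff]
  simp only [Bool.and_eq_true, Bool.or_eq_true, Bool.not_eq_true', Bool.not_eq_true,
    bne_eq_false_iff_eq, beq_eq_false_iff_ne, beq_iff_eq, bne_iff_ne, ne_eq,
    Bool.not_eq_eq_eq_not, Bool.not_true, PySem.Set.contains_eq_listContains,
    List.contains_eq_mem, decide_eq_false_iff_not, decide_eq_true_eq]
  rw [hconf]
  simp only [pvHMis, pvVMis, Bool.and_eq_true, decide_eq_true_eq, bne_iff_ne, ne_eq, hi1, hj1]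
  have s3 : (pvCell s i j = pvCell s i (j+1)) ↔ (pvCell s i (j+1) = pvCell s i j) := eq_comm
  have s2 : (pvCell s i j = pvCell s (i+1) j) ↔ (pvCell s (i+1) j = pvCell s i j) := eq_comm
  simp only [s3, s2]
  by_cases e1 : pvCell s (i-1) j = pvCell s i j <;>
  by_cases e2 : pvCell s (i+1) j = pvCell s i j <;>
  by_cases e3 : pvCell s i (j+1) = pvCell s i j <;>
  by_cases e4 : pvCell s i (j-1) = pvCell s i j <;>
    simp only [e1, e2, e3, e4, not_true, not_false_iff, iff_true, true_iff, and_true,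
      and_false, false_and, true_and, or_false, false_or, not_and, not_or, not_not] <;>
    by_cases hd : pvCell s i j = "." <;> simp [hd] <;> omega

-- per-cell: A's continue-chain body equals B's guarded expand step
lemma cell_body_eq (s : List (List String)) (H W i j : Int) (acc : List (Int × Int))
    (hi0 : 0 ≤ i) (hiH : i < H) (hj0 : 0 ≤ j) (hjW : j < W) :
    (let num := pvCell s i j
     if num == "." then acc
     else if i != 0 && !(pvMatch (pvCell s (i-1) j) num) then acc
     else if i != H - 1 && !(pvMatch (pvCell s (i+1) j) num) then acc
     else if j != W - 1 && !(pvMatch (pvCell s i (j+1)) num) then acc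
     else if j != 0 && !(pvMatch (pvCell s i (j-1)) num) then acc
     else
       let dl := PySem.Set.add acc (i, j)
       let dl := if i != 0 then PySem.Set.add dl (i-1, j) else dl
       let dl := if i != H - 1 then PySem.Set.add dl (i+1, j) else dl
       let dl := if j != W - 1 then PySem.Set.add dl (i, j+1) else dl
       let dl := if j != 0 then PySem.Set.add dl (i, j-1) else dl
       dl) =
    (if pvCell s i j != "." && !(PySem.Set.contains (pvConflict s H W) (i, j)) then
       let out := PySem.Set.add acc (i, j)
       let out := if decide (0 < i) then PySem.Set.add out (i-1, j) else out
       let out := if decide (i + 1 < H) then PySem.Set.add out (i+1, j) else out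
       let out := if decide (j + 1 < W) then PySem.Set.add out (i, j+1) else out
       if decide (0 < j) then PySem.Set.add out (i, j-1) else out
     else acc) := by
  have g1 : (i != 0) = decide (0 < i) := by
    rw [Bool.eq_iff_iff]; simp only [bne_iff_ne, ne_eq, decide_eq_true_eq]; omega
  have g2 : (i != H - 1) = decide (i + 1 < H) := by
    rw [Bool.eq_iff_iff]; simp only [bne_iff_ne, ne_eq, decide_eq_true_eq]; omega
  have g3 : (j != W - 1) = decide (j + 1 < W) := by
    rw [Bool.eq_iff_iff]; simp only [bne_iff_ne, ne_eq, decide_eq_true_eq]; omega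
  have g4 : (j != 0) = decide (0 < j) := by
    rw [Bool.eq_iff_iff]; simp only [bne_iff_ne, ne_eq, decide_eq_true_eq]; omega
  simp only [pvMatch_eq]
  rw [pv_chain acc _ _ _ _ _ _ _ _ _ _, guard_eq s H W i j hi0 hiH hj0 hjW, g1, g2, g3, g4]

-- ===== VERDICT =====
theorem del_search_spec : Claim_equal_del_search := by
  intro s _ _
  unfold Spec_del_search del_search del_search_alt
  apply PySem.List.foldl_congr_mem
  intro acc i hi
  apply PySem.List.foldl_congr_mem
  intro acc' j hj
  rw [PySem.List.mem_pyRange_one] at hi hj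
  exact cell_body_eq s _ _ i j acc' hi.1 hi.2 hj.1 hj.2
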